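-- pv_equiv track=rewrite | github.com/imsay3m/cs-fundamentals-with-phitron-2023 | C_Good_Sequence.py | min_removals_for_good_sequence
-- ===== SOURCE A (Python) =====
-- def min_removals_for_good_sequence(N, a):
--     # Count the occurrences of each number in the sequence
--     count_dict = {}
--     for num in a:
--         count_dict[num] = count_dict.get(num, 0) + 1
--
--     removals = 0
--
--     # Iterate through the numbers and check if they satisfy the condition
--     for num, count in count_dict.items():
--         if count > num:
--             removals += count - num
--         elif count < num:
--             removals += count
--
--     return removals
-- ===== SOURCE B (Python) =====
-- def _removal_contrib(num, count):
--     # removals needed for a value `num` occurring `count` times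
--     if count > num:
--         return count - num
--     if count < num:
--         return count
--     return 0
--
--
-- def min_removals_for_good_sequence(N, a):
--     # sort-then-scan: walk maximal runs of equal values in sorted(a)
--     s = sorted(a)
--     if not s:
--         return 0
--     removals = 0
--     cur = s[0]
--     cnt = 1
--     for x in s[1:]:
--         if x == cur:
--             cnt += 1
--         else:
--             removals += _removal_contrib(cur, cnt)
--             cur = x
--             cnt = 1
--     return removals + _removal_contrib(cur, cnt)
-- ===== Notes on version B (the rewrite author's own statement) =====
-- stated objective: alternative
-- what changed: Replaces the dict-based frequency count plus dict-items pass with a sort-then-scan over maximal runs of equal values in sorted(a), accumulating each run's removal contribution in one linear sweep.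
import Mathlib
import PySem

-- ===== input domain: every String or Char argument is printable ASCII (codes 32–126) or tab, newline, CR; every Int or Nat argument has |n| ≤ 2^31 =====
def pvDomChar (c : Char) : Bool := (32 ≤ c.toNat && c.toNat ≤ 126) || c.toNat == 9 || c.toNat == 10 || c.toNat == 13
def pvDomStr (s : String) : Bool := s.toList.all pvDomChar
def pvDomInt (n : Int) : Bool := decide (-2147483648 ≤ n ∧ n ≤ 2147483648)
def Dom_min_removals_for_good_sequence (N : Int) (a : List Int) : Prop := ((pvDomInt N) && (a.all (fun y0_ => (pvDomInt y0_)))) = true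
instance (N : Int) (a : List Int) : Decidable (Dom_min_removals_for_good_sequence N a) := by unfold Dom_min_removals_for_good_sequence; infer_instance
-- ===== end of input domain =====

-- B replaces A's dict-based frequency count with a sort-then-scan over maximal runs of equal values (alternative decomposition, same result).


-- ===== PORT A =====
def min_removals_for_good_sequence (N : Int) (a : List Int) : Int :=
  -- count_dict[num] = count_dict.get(num, 0) + 1
  let count_dict : PySem.Dict Int Int :=
    a.foldl (fun d num => d.insert num (d.getD num 0 + 1)) PySem.Dict.empty
  -- for num, count in count_dict.items(): …
  count_dict.items.foldl
    (fun removals p =>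
      if p.2 > p.1 then removals + (p.2 - p.1)
      else if p.2 < p.1 then removals + p.2
      else removals) 0

-- ===== PORT B =====
-- _removal_contrib(num, count)
def mrContrib (num count : Int) : Int :=
  if count > num then count - num
  else if count < num then count
  else 0

-- the run-length scan loop of Source B: cur/cnt are the current run, removals folded in
def mrGo (cur cnt : Int) : List Int → Int
  | [] => mrContrib cur cnt
  | x :: xs => if x = cur then mrGo cur (cnt + 1) xs else mrContrib cur cnt + mrGo x 1 xs

def min_removals_for_good_sequence_alt (N : Int) (a : List Int) : Int :=
  match PySem.List.sorted a (fun x => x) false with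
  | [] => 0
  | x :: xs => mrGo x 1 xs

-- ===== PRECONDITION & SPEC =====
def Spec_min_removals_for_good_sequence (N : Int) (a : List Int) (out : Int) : Prop := out = min_removals_for_good_sequence_alt N a
instance (N : Int) (a : List Int) (out : Int) : Decidable (Spec_min_removals_for_good_sequence N a out) := by unfold Spec_min_removals_for_good_sequence; infer_instance

-- ===== CLAIM (what is proved, stated in full; the proofs are below) =====
def Claim_equal_min_removals_for_good_sequence : Prop := ∀ (N : Int) (a : List Int), Dom_min_removals_for_good_sequence N a → Spec_min_removals_for_good_sequence N a (min_removals_for_good_sequence N a)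

-- ===== LEMMAS AND PROOFS =====

/-- The common value both programs compute: the removal contributions summed over
the distinct values of `m`, each with its multiplicity in `m`. -/
def mrT (m : List Int) : Int :=
  ∑ u ∈ m.toFinset, mrContrib u (m.count u : Int)

lemma mrT_perm {m m' : List Int} (h : m.Perm m') : mrT m = mrT m' := by
  unfold mrT
  rw [List.toFinset_eq_of_perm m m' h]
  exact Finset.sum_congr rfl (fun u _ => by rw [h.count_eq])

lemma mrT_cons (x : Int) (xs : List Int) :
    mrT (x :: xs) = mrContrib x (1 + (xs.count x : Int)) + mrT (xs.filter (fun y => y ≠ x)) := by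
  unfold mrT
  have hx : x ∈ (x :: xs).toFinset := by simp
  rw [← Finset.add_sum_erase _ _ hx]
  have h1 : ((x :: xs).count x : Int) = 1 + (xs.count x : Int) := by
    rw [List.count_cons_self]; push_cast; ring
  rw [h1]
  congr 1
  have he : ((x :: xs).toFinset).erase x = (xs.filter (fun y => y ≠ x)).toFinset := by
    ext u
    simp [and_comm]
  rw [he]
  refine Finset.sum_congr rfl (fun u hu => ?_)
  have hux : u ≠ x := by
    have h := List.mem_toFinset.mp hu
    have := (List.mem_filter.mp h).2
    simpa using this
  have hc : List.count u (x :: xs) = List.count u (xs.filter (fun y => y ≠ x)) := by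
    rw [List.count_filter (by simpa using hux)]
    simp [Ne.symm hux]
  rw [hc]

/-- Loop invariant of B's run-length scan on a sorted tail. -/
lemma mrGo_spec (l : List Int) (hs : l.Pairwise (· ≤ ·)) (v c : Int)
    (hmin : ∀ y ∈ l, v ≤ y) :
    mrGo v c l = mrContrib v (c + (l.count v : Int)) + mrT (l.filter (fun y => y ≠ v)) := by
  induction l generalizing v c with
  | nil => simp [mrGo, mrT]
  | cons x xs ih =>
    have hs' : xs.Pairwise (· ≤ ·) := (List.pairwise_cons.mp hs).2
    have hxmin : ∀ y ∈ xs, x ≤ y := (List.pairwise_cons.mp hs).1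
    by_cases hxv : x = v
    · subst hxv
      have : mrGo x c (x :: xs) = mrGo x (c + 1) xs := by simp [mrGo]
      rw [this, ih hs' x (c + 1) hxmin]
      rw [List.count_cons_self]
      have hf : (x :: xs).filter (fun y => y ≠ x) = xs.filter (fun y => y ≠ x) := by
        simp
      rw [hf]
      congr 2
      push_cast; ring
    · have hvx : v < x := lt_of_le_of_ne (hmin x (List.mem_cons_self)) (Ne.symm hxv)
      have hvnot : ∀ y ∈ x :: xs, v < y := by
        intro y hy
        rcases List.mem_cons.mp hy with rfl | hy'
        · exact hvx
        · exact lt_of_lt_of_le hvx (hxmin y hy')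
      have hcount : ((x :: xs).count v : Int) = 0 := by
        have : (x :: xs).count v = 0 := by
          rw [List.count_eq_zero]
          intro hv
          exact absurd rfl (ne_of_gt (hvnot v hv))
        simp [this]
      have hfilter : (x :: xs).filter (fun y => y ≠ v) = x :: xs := by
        rw [List.filter_eq_self]
        intro y hy
        exact decide_eq_true (ne_of_gt (hvnot y hy))
      have : mrGo v c (x :: xs) = mrContrib v c + mrGo x 1 xs := by
        simp [mrGo, hxv]
      rw [this, ih hs' x 1 hxmin, hcount, hfilter, mrT_cons]
      ring_nf

lemma alt_eq_mrT (N : Int) (a : List Int) : min_removals_for_good_sequence_alt N a = mrT a := by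
  unfold min_removals_for_good_sequence_alt
  have hperm : (PySem.List.sorted a (fun x => x) false).Perm a := PySem.List.sorted_perm a _ _
  have hpw : (PySem.List.sorted a (fun x => x) false).Pairwise (· ≤ ·) := by
    have := PySem.List.sorted_pairwise a (fun x => x)
    simpa using this
  rw [← mrT_perm hperm]
  cases hsa : PySem.List.sorted a (fun x => x) false with
  | nil => simp [mrT]
  | cons x xs =>
    show mrGo x 1 xs = mrT (x :: xs)
    rw [hsa] at hpw
    have hxmin : ∀ y ∈ xs, x ≤ y := (List.pairwise_cons.mp hpw).1
    rw [mrGo_spec xs (List.pairwise_cons.mp hpw).2 x 1 hxmin, mrT_cons]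

lemma a_foldl_sum (l : List (Int × Int)) (acc : Int) :
    l.foldl (fun removals p =>
      if p.2 > p.1 then removals + (p.2 - p.1)
      else if p.2 < p.1 then removals + p.2
      else removals) acc
    = acc + (l.map (fun p => mrContrib p.1 p.2)).sum := by
  induction l generalizing acc with
  | nil => simp
  | cons p ps ih =>
    rw [List.foldl_cons, ih, List.map_cons, List.sum_cons]
    unfold mrContrib
    split_ifs <;> ring

lemma a_eq_mrT (N : Int) (a : List Int) : min_removals_for_good_sequence N a = mrT a := by
  show (List.foldl (fun removals p =>
      if p.2 > p.1 then removals + (p.2 - p.1)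
      else if p.2 < p.1 then removals + p.2
      else removals) 0
      (a.foldl (fun d num => d.insert num (d.getD num 0 + 1)) PySem.Dict.empty).items) = mrT a
  rw [PySem.Dict.foldl_insert_getD_add_one_eq_counter, PySem.Dict.items_counter,
    a_foldl_sum, List.map_map]
  have hnd : (PySem.Set.ofList a).Nodup := PySem.Set.nodup_ofList a
  have hmem : ∀ u : Int, u ∈ PySem.Set.ofList a ↔ u ∈ a := fun u => PySem.Set.mem_ofList a u
  unfold mrT
  have htf : (PySem.Set.ofList a).toFinset = a.toFinset := by
    ext u; simp [hmem u]
  rw [← htf, ← List.sum_toFinset _ hnd]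
  simp [Function.comp]

-- ===== VERDICT (by name: the statement is the Claim_ definition above) =====
theorem min_removals_for_good_sequence_spec : Claim_equal_min_removals_for_good_sequence := by
  intro N a _
  unfold Spec_min_removals_for_good_sequence
  rw [a_eq_mrT, alt_eq_mrT]
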